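-- pv_equiv track=rewrite | github.com/infraction/Advent-of-Code-2022-1-1 | main.py | Find_Top_3
-- ===== SOURCE A (Python) =====
-- def Find_Top_3(file):
--     highest_sums = [0,0,0]
--     check_sum = 0
--
--     for line in file:
--         if line.startswith('\n'):
--             if check_sum > highest_sums[0]:
--                 highest_sums[0] = check_sum
--                 highest_sums.sort()
--             check_sum = 0
--         else:
--             check_sum += int(line)
--     top3 = highest_sums[0]+highest_sums[1]+highest_sums[2]
--     return top3
-- ===== SOURCE B (Python) =====
-- def Find_Top_3(file):
--     # Collect every finalized group sum, then take the three largest by sorting.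
--     # The list is seeded with three zeros so that fewer than three groups (or
--     # negative group sums) contribute zeros, as the zero-initialised selection does.
--     sums = [0, 0, 0]
--     check_sum = 0
--     for line in file:
--         if line.startswith('\n'):
--             sums.append(check_sum)
--             check_sum = 0
--         else:
--             check_sum += int(line)
--     return sum(sorted(sums)[-3:])
-- ===== Notes on version B (the rewrite author's own statement) =====
-- stated objective: simpler
-- what changed: A maintains the top three group sums online in a zero-seeded sorted 3-list (overwrite the minimum, re-sort inside the loop); B just appends every finalized group sum to a list and takes sum(sorted(sums)[-3:]) once at the end, so all selection logic disappears from the loop.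
import Mathlib
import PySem

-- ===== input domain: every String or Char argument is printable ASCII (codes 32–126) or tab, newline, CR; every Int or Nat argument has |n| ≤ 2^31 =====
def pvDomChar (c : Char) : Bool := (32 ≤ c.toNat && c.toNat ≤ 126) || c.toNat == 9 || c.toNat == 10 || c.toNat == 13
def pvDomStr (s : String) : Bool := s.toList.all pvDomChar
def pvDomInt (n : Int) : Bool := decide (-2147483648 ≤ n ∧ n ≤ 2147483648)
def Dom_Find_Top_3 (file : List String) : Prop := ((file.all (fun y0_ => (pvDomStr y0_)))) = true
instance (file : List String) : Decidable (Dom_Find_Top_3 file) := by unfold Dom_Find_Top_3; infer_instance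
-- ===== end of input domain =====

-- B keeps A's streaming grouping loop but replaces the online size-3 sorted-list
-- selection by collecting all group sums and sorting once at the end (objective:
-- simpler — no in-loop selection logic).

-- ===== PORT A =====
-- loop body of A: finalize the running sum on a line starting with '\n',
-- keeping the three largest seen (zero-seeded) in a sorted 3-list; else add int(line).
-- (PySem.Int.ofStr? line) is some on every line reached here inside Pre_; .getD 0 never fires there.
def pvStepA (st : List Int × Int) (line : String) : List Int × Int :=
  if PySem.Str.startswith line "\n" then
    (if st.2 > PySem.List.pyGetD st.1 0 0 then
       (PySem.List.sorted (st.1.set 0 st.2) (fun x => x) false, (0 : Int))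
     else (st.1, (0 : Int)))
  else (st.1, st.2 + (PySem.Int.ofStr? line).getD 0)

def Find_Top_3 (file : List String) : Int :=
  let st := file.foldl pvStepA ([0, 0, 0], 0)
  -- highest_sums[0] + highest_sums[1] + highest_sums[2]; the list always has length 3
  PySem.List.pyGetD st.1 0 0 + PySem.List.pyGetD st.1 1 0 + PySem.List.pyGetD st.1 2 0

-- ===== PORT B =====
-- loop body of B: same grouping, but every finalized sum is appended to the list.
def pvStepB (st : List Int × Int) (line : String) : List Int × Int :=
  if PySem.Str.startswith line "\n" then (st.1 ++ [st.2], (0 : Int))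
  else (st.1, st.2 + (PySem.Int.ofStr? line).getD 0)

def Find_Top_3_alt (file : List String) : Int :=
  let st := file.foldl pvStepB ([0, 0, 0], 0)
  -- sum(sorted(sums)[-3:])
  (PySem.List.slice (PySem.List.sorted st.1 (fun x => x) false) (some (-3)) none).sum

-- ===== PRECONDITION & SPEC =====
-- Pre_ excludes exactly the inputs where Python A raises ValueError: a line that
-- neither starts with '\n' nor parses as an int.
def Pre_Find_Top_3 (file : List String) : Prop :=
  (file.all (fun line => PySem.Str.startswith line "\n" || (PySem.Int.ofStr? line).isSome)) = true
instance (file : List String) : Decidable (Pre_Find_Top_3 file) := by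
  unfold Pre_Find_Top_3; infer_instance
def pvWitness_Find_Top_3 : List String := ["1", "2", "\n", "10", "\n", " 4 ", "\n", "3"]

def Spec_Find_Top_3 (file : List String) (out : Int) : Prop := out = Find_Top_3_alt file
instance (file : List String) (out : Int) : Decidable (Spec_Find_Top_3 file out) := by unfold Spec_Find_Top_3; infer_instance

-- ===== CLAIM (what is proved, stated in full; the proofs are below) =====
def Claim_equal_Find_Top_3 : Prop := ∀ (file : List String), Dom_Find_Top_3 file → Pre_Find_Top_3 file → Spec_Find_Top_3 file (Find_Top_3 file)

-- ===== LEMMAS AND PROOFS =====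

-- sorted with the identity key, and one insertion-sort step
def pvSortedI (l : List Int) : List Int := PySem.List.sorted l (fun x => x) false
def pvIns (c : Int) (l : List Int) : List Int :=
  PySem.List.insertBy (fun a b => decide (a < b)) c l

-- A's selection step on the 3-list
def pvTop (hs : List Int) (c : Int) : List Int :=
  if c > PySem.List.pyGetD hs 0 0 then PySem.List.sorted (hs.set 0 c) (fun x => x) false else hs

lemma pvSortedI_append (l : List Int) (c : Int) :
    pvSortedI (l ++ [c]) = pvIns c (pvSortedI l) := by
  simp [pvSortedI, pvIns, PySem.List.sorted_eq_foldl_insertBy]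

lemma pvSortedI_length (l : List Int) : (pvSortedI l).length = l.length :=
  (PySem.List.sorted_perm l _ _).length_eq

lemma pvSortedI_pairwise (l : List Int) : (pvSortedI l).Pairwise (· ≤ ·) := by
  simpa using PySem.List.sorted_pairwise l (fun x => x)

lemma pvGet0 (a : Int) (t : List Int) : PySem.List.pyGetD (a :: t) 0 0 = a := by
  simp [PySem.List.pyGetD, PySem.List.pyGet?, PySem.List.pyIdx?]

lemma pvCore (c : Int) : ∀ (l : List Int), l.Pairwise (· ≤ ·) → 3 ≤ l.length →
    (pvIns c l).drop (l.length - 2) = pvTop (l.drop (l.length - 3)) c := by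
  intro l
  induction l with
  | nil => intro _ h; simp at h
  | cons x l' ih =>
    intro hp hl
    rw [List.pairwise_cons] at hp
    obtain ⟨hx, hp'⟩ := hp
    rcases Nat.lt_or_ge l'.length 3 with h3 | h3
    · -- exactly three elements: l = [x, y, z]
      have h2 : l'.length = 2 := by simp at hl; omega
      obtain ⟨y, z, rfl⟩ := List.length_eq_two.mp h2
      have hxy : x ≤ y := hx y (by simp)
      have hxz : x ≤ z := hx z (by simp)
      have hyz : y ≤ z := by
        rw [List.pairwise_cons] at hp'; exact hp'.1 z (by simp)
      rw [show ((x :: y :: z :: ([] : List Int)).length - 2) = 1 from rfl,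
        show ((x :: y :: z :: ([] : List Int)).length - 3) = 0 from rfl, List.drop_zero]
      simp only [pvIns, pvTop, PySem.List.sorted_eq_foldl_insertBy, List.foldl,
        PySem.List.insertBy, List.set, PySem.List.pyGetD, PySem.List.pyGet?, PySem.List.pyIdx?]
      split_ifs <;> simp_all [PySem.List.insertBy] <;>
        first | omega | (split_ifs <;> simp_all <;> omega)
    · -- at least four elements: peel off the head
      have hm : l'.length + 1 - 3 = (l'.length - 3) + 1 := by omega
      have hm2 : l'.length + 1 - 2 = (l'.length - 2) + 1 := by omega
      have hdropne : ∃ a t, l'.drop (l'.length - 3) = a :: t := by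
        have : (l'.drop (l'.length - 3)).length = 3 := by rw [List.length_drop]; omega
        cases hD : l'.drop (l'.length - 3) with
        | nil => rw [hD] at this; simp at this
        | cons a t => exact ⟨a, t, rfl⟩
      obtain ⟨a, t, hD⟩ := hdropne
      have hxa : x ≤ a := hx a ((List.drop_subset _ _) (by rw [hD]; exact List.mem_cons_self ..))
      have hins : pvIns c (x :: l') = if c < x then c :: x :: l' else x :: pvIns c l' := by
        simp [pvIns, PySem.List.insertBy]
      rw [List.length_cons, hm, List.drop_succ_cons, hm2, hins]
      split_ifs with hcx
      · -- c goes in front: top-3 unchanged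
        have hnot : ¬ PySem.List.pyGetD (l'.drop (l'.length - 3)) 0 0 < c := by
          rw [hD, pvGet0]; omega
        rw [pvTop, if_neg hnot]
        rw [show l'.length - 2 + 1 = (l'.length - 3) + 1 + 1 by omega,
          List.drop_succ_cons, List.drop_succ_cons]
      · rw [List.drop_succ_cons]
        exact ih hp' h3

-- key step: appending a finalized sum preserves the top-3 relation
lemma pvKey (sums hs : List Int) (c : Int) (hlen : 3 ≤ sums.length)
    (hrel : hs = (pvSortedI sums).drop (sums.length - 3)) :
    pvTop hs c = (pvSortedI (sums ++ [c])).drop ((sums ++ [c]).length - 3) := by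
  have hl : (pvSortedI sums).length = sums.length := pvSortedI_length sums
  have h := pvCore c (pvSortedI sums) (pvSortedI_pairwise sums) (by omega)
  rw [pvSortedI_append, List.length_append, List.length_singleton]
  rw [hl] at h
  rw [show sums.length + 1 - 3 = sums.length - 2 by omega, hrel]
  exact h.symm

lemma pvLoop : ∀ (file : List String) (sums hs : List Int) (cur : Int),
    3 ≤ sums.length → hs = (pvSortedI sums).drop (sums.length - 3) →
    (file.foldl pvStepA (hs, cur)).2 = (file.foldl pvStepB (sums, cur)).2 ∧
    3 ≤ (file.foldl pvStepB (sums, cur)).1.length ∧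
    (file.foldl pvStepA (hs, cur)).1 =
      (pvSortedI (file.foldl pvStepB (sums, cur)).1).drop
        ((file.foldl pvStepB (sums, cur)).1.length - 3) := by
  intro file
  induction file with
  | nil => intro sums hs cur h1 h2; exact ⟨rfl, h1, h2⟩
  | cons line rest ih =>
    intro sums hs cur h1 h2
    by_cases hb : PySem.Chars.startswith line.toList ['\n'] = true
    · have hA : pvStepA (hs, cur) line = (pvTop hs cur, 0) := by
        simp [pvStepA, pvTop, hb]
        split_ifs <;> rfl
      have hB : pvStepB (sums, cur) line = (sums ++ [cur], 0) := by
        simp [pvStepB, hb]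
      simp only [List.foldl_cons, hA, hB]
      exact ih (sums ++ [cur]) (pvTop hs cur) 0 (by simp; omega)
        (pvKey sums hs cur h1 h2)
    · have hA : pvStepA (hs, cur) line = (hs, cur + (PySem.Int.ofStr? line).getD 0) := by
        simp [pvStepA, hb]
      have hB : pvStepB (sums, cur) line = (sums, cur + (PySem.Int.ofStr? line).getD 0) := by
        simp [pvStepB, hb]
      simp only [List.foldl_cons, hA, hB]
      exact ih sums hs _ h1 h2

lemma pvSum3 (t : List Int) (h : t.length = 3) :
    PySem.List.pyGetD t 0 0 + PySem.List.pyGetD t 1 0 + PySem.List.pyGetD t 2 0 = t.sum := by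
  match t, h with
  | [a, b, c], _ => simp [PySem.List.pyGetD, PySem.List.pyGet?, PySem.List.pyIdx?]; ring

-- ===== VERDICT (by name: the statement is the Claim_ definition above) =====
theorem Find_Top_3_spec : Claim_equal_Find_Top_3 := by
  intro file _hdom _hpre
  unfold Spec_Find_Top_3 Find_Top_3 Find_Top_3_alt
  obtain ⟨-, hlen, hrel⟩ := pvLoop file [0,0,0] [0,0,0] 0 (by simp) (by decide)
  set stB := file.foldl pvStepB (([0,0,0] : List Int), (0 : Int)) with hB
  set stA := file.foldl pvStepA (([0,0,0] : List Int), (0 : Int)) with hA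
  have hslice : PySem.List.slice (pvSortedI stB.1) (some (-3)) none
      = (pvSortedI stB.1).drop ((pvSortedI stB.1).length - 3) := by
    exact PySem.List.slice_from_neg_ofNat _ 3 (by omega)
  have hlen3 : stA.1.length = 3 := by
    rw [hrel]; rw [List.length_drop, pvSortedI_length]; omega
  rw [pvSum3 stA.1 hlen3, hrel]
  show _ = (PySem.List.slice (PySem.List.sorted stB.1 (fun x => x) false) (some (-3)) none).sum
  rw [show PySem.List.sorted stB.1 (fun x => x) false = pvSortedI stB.1 from rfl, hslice,
    pvSortedI_length]
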